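-- pv_equiv track=rewrite | github.com/redteam-agent/redteam-agent-core | src/redteam_agent_core/chains/remediation.py | _find_code_location
-- ===== SOURCE A (Python) =====
-- def _find_code_location(
--
--     source_code: str,
--     target_code: str,
-- ) -> tuple[int, int]:
--     """Find the line numbers where target code exists in source."""
--     lines = source_code.split("\n")
--     target_lines = target_code.split("\n")
--
--     if not target_lines:
--         return (1, 1)
--
--     first_line = target_lines[0].strip()
--
--     for i, line in enumerate(lines):
--         if first_line in line:
--             return (i + 1, i + len(target_lines))
--
--     return (1, len(target_lines))
-- ===== SOURCE B (Python) =====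
-- def _find_code_location(
--     source_code: str,
--     target_code: str,
-- ) -> tuple[int, int]:
--     """Find the line numbers where target code exists in source."""
--     target_lines = target_code.split("\n")
--     first_line = target_lines[0].strip()
--     idx = source_code.find(first_line)
--     if idx == -1:
--         return (1, len(target_lines))
--     line_no = source_code[:idx].count("\n") + 1
--     return (line_no, line_no + len(target_lines) - 1)
-- ===== Notes on version B (the rewrite author's own statement) =====
-- stated objective: idiomatic
-- what changed: B never builds or scans the per-line list of the source: it searches the raw source string once with str.find and converts the character offset to a line number by counting newlines before it, instead of enumerating split lines and testing substring membership line by line.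
import Mathlib
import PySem

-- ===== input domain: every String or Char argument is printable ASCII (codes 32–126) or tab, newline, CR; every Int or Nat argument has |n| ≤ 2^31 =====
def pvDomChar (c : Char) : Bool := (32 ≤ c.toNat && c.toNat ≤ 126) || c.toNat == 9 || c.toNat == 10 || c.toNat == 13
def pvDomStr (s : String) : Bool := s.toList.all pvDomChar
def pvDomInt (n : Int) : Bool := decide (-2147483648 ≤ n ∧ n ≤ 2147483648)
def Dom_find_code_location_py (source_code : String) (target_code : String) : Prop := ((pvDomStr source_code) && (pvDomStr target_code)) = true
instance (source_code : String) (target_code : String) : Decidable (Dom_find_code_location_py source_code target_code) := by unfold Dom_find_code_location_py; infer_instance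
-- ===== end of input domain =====

-- ===== PORT A =====
-- B changes what is searched, not the answer: A splits the source into lines and scans them;
-- ports are written over List Char (PySem.Chars), exact per PySem.
-- loop 'for i, line in enumerate(lines): if first_line in line: return (i+1, i+len(target_lines))'
def aLoop (first : List Char) (tlen : Int) : List (Int × List Char) → Int × Int
  | [] => (1, tlen)                                   -- 'return (1, len(target_lines))' after the loop
  | (i, line) :: rest =>
      if PySem.Chars.isIn first line then (i + 1, i + tlen) else aLoop first tlen rest

def find_code_location_py (source_code : String) (target_code : String) : Int × Int :=
  let lines := PySem.Chars.splitOn source_code.toList ['\n']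
  let target_lines := PySem.Chars.splitOn target_code.toList ['\n']
  if target_lines.isEmpty then (1, 1)                 -- 'if not target_lines' (dead: split never returns [])
  else
    let first_line := PySem.Chars.strip (target_lines.headD [])   -- target_lines[0].strip(); guard makes headD safe
    aLoop first_line (target_lines.length : Int) (PySem.List.enumerate lines 0)

-- ===== PORT B =====
def find_code_location_py_alt (source_code : String) (target_code : String) : Int × Int :=
  let target_lines := PySem.Chars.splitOn target_code.toList ['\n']
  let first_line := PySem.Chars.strip (target_lines.headD [])     -- target_lines[0].strip(); split never returns []
  let idx := PySem.Chars.find source_code.toList first_line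
  if idx = -1 then (1, (target_lines.length : Int))
  else
    let line_no : Int :=
      (PySem.Chars.count (PySem.List.slice source_code.toList none (some idx)) ['\n'] : Int) + 1
    (line_no, line_no + (target_lines.length : Int) - 1)

-- ===== PRECONDITION & SPEC =====
def Spec_find_code_location_py (source_code : String) (target_code : String) (out : Int × Int) : Prop := out = find_code_location_py_alt source_code target_code
instance (source_code : String) (target_code : String) (out : Int × Int) : Decidable (Spec_find_code_location_py source_code target_code out) := by unfold Spec_find_code_location_py; infer_instance

-- ===== CLAIM (what is proved, stated in full; the proofs are below) =====
def Claim_equal_find_code_location_py : Prop := ∀ (source_code : String) (target_code : String), Dom_find_code_location_py source_code target_code → Spec_find_code_location_py source_code target_code (find_code_location_py source_code target_code)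

-- ===== LEMMAS AND PROOFS =====

-- reference splitter (proof-side only): pieces c l = the '\n'-split piece list
def pieces (c : Char) : List Char → List (List Char)
  | [] => [[]]
  | h :: t => if h = c then [] :: pieces c t
              else (pieces c t).modifyHead (h :: ·)

lemma pieces_ne_nil (c : Char) (l : List Char) : pieces c l ≠ [] := by
  induction l with
  | nil => simp [pieces]
  | cons h t ih =>
    simp only [pieces]
    split
    · simp
    · cases hp : pieces c t <;> simp_all [List.modifyHead]

lemma splitOn_go_eq (c : Char) : ∀ (fuel : Nat) (l cur : List Char) (acc : List (List Char)),
    l.length < fuel →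
    PySem.Chars.splitOn.go [c] fuel l cur acc
      = acc.reverse ++ (pieces c l).modifyHead (cur.reverse ++ ·) := by
  intro fuel
  induction fuel with
  | zero => intro l cur acc h; omega
  | succ n ih =>
    intro l cur acc h
    cases l with
    | nil => simp [PySem.Chars.splitOn.go, pieces, List.modifyHead]
    | cons ch rest =>
      rw [PySem.Chars.splitOn.go]
      simp only [List.length_cons] at h
      by_cases hc : ch = c
      · subst hc
        rw [if_pos (by simp [List.isPrefixOf])]
        rw [ih _ _ _ (by simpa using (by omega : rest.length < n))]
        simp only [pieces, 
          List.reverse_cons, List.reverse_nil, List.nil_append, List.append_assoc]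
        congr 1
        cases hp : pieces ch rest <;> simp [List.modifyHead, hp]
      · rw [if_neg (by simp [List.isPrefixOf]; exact fun h' => hc (by simpa using h'.symm))]
        rw [ih _ _ _ (by omega)]
        simp only [pieces, if_neg hc, List.modifyHead_modifyHead]
        congr 1
        cases hp : pieces c rest <;> simp [List.modifyHead, Function.comp]

lemma splitOn_eq_pieces (c : Char) (l : List Char) :
    PySem.Chars.splitOn l [c] = pieces c l := by
  rw [PySem.Chars.splitOn, splitOn_go_eq c (l.length + 1) l [] [] (by omega)]
  cases hp : pieces c l <;> simp [List.modifyHead]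

lemma pieces_no_sep (c : Char) (l : List Char) : ∀ p ∈ pieces c l, c ∉ p := by
  induction l with
  | nil => simp [pieces]
  | cons h t ih =>
    intro p hp
    by_cases hc : h = c
    · rw [show pieces c (h :: t) = [] :: pieces c t by simp [pieces, hc]] at hp
      rcases List.mem_cons.mp hp with hp | hp
      · simp [hp]
      · exact ih p hp
    · cases hq : pieces c t with
      | nil => exact absurd hq (pieces_ne_nil c t)
      | cons q r =>
        rw [show pieces c (h :: t) = (h :: q) :: r by
              simp [pieces, hc, hq, List.modifyHead]] at hp
        rcases List.mem_cons.mp hp with hp1 | hp1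
        · subst hp1
          intro hmemc
          rcases List.mem_cons.mp hmemc with h1 | h1
          · exact hc h1.symm
          · exact ih q (by rw [hq]; exact List.mem_cons_self) h1
        · exact ih p (by rw [hq]; exact List.mem_cons_of_mem _ hp1)

lemma pieces_of_not_mem {c : Char} {l : List Char} (h : c ∉ l) : pieces c l = [l] := by
  induction l with
  | nil => rfl
  | cons x t ih =>
    have hx : x ≠ c := fun he => h (by simp [he])
    simp only [pieces, if_neg hx, ih (fun hm => h (List.mem_cons_of_mem _ hm))]
    rfl

lemma pieces_append {c : Char} {a : List Char} (b : List Char) (h : c ∉ a) :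
    pieces c (a ++ c :: b) = a :: pieces c b := by
  induction a with
  | nil => simp [pieces]
  | cons x t ih =>
    have hx : x ≠ c := fun he => h (by simp [he])
    simp only [List.cons_append, pieces, if_neg hx,
      ih (fun hm => h (List.mem_cons_of_mem _ hm))]
    rfl

lemma count_go_single (c : Char) : ∀ (fuel : Nat) (l : List Char) (acc : Nat),
    l.length ≤ fuel → PySem.Chars.count.go [c] fuel l acc = acc + l.count c := by
  intro fuel
  induction fuel with
  | zero =>
    intro l acc h
    have : l = [] := List.eq_nil_of_length_eq_zero (by omega)
    subst this; simp [PySem.Chars.count.go]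
  | succ n ih =>
    intro l acc h
    cases l with
    | nil => simp [PySem.Chars.count.go]
    | cons x t =>
      rw [PySem.Chars.count.go]
      simp only [List.length_cons] at h
      by_cases hx : x = c
      · subst hx
        rw [if_pos (by simp [List.isPrefixOf])]
        rw [ih _ _ (by simpa using (by omega : t.length ≤ n))]
        simp [List.count_cons_self]
        omega
      · rw [if_neg (by simp [List.isPrefixOf]; exact fun h' => hx (by simpa using h'.symm))]
        rw [ih _ _ (by omega)]
        simp [hx]

lemma count_single (c : Char) (l : List Char) : PySem.Chars.count l [c] = l.count c := by
  rw [PySem.Chars.count]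
  rw [if_neg (by simp)]
  rw [count_go_single c l.length l 0 le_rfl]
  omega

lemma strip_subset {x : Char} {l : List Char} (h : x ∈ PySem.Chars.strip l) : x ∈ l := by
  rw [PySem.Chars.strip, PySem.Chars.rstrip, PySem.Chars.lstrip] at h
  rw [List.mem_reverse] at h
  have h1 := (List.dropWhile_sublist (p := PySem.Chars.isspace)
    (l := (List.dropWhile PySem.Chars.isspace l).reverse)).subset h
  rw [List.mem_reverse] at h1
  exact (List.dropWhile_sublist (p := PySem.Chars.isspace) (l := l)).subset h1

lemma prefix_cross {c : Char} {first x : List Char} (y : List Char) (hnf : c ∉ first) :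
    first <+: x ++ c :: y ↔ first <+: x := by
  constructor
  · intro h
    rcases Nat.lt_or_ge x.length first.length with hlt | hle
    · exfalso
      have hlen2 : x.length < (x ++ c :: y).length := by simp
      have hgl := h.getElem (i := x.length) hlt
      have hc2 : first[x.length]'hlt = c := by
        rw [hgl, List.getElem_append_right le_rfl]
        simp
      exact hnf (hc2 ▸ List.getElem_mem _)
    · have heq : first = (x ++ c :: y).take first.length := by
        rcases h with ⟨t, ht⟩
        rw [← ht]; simp
      rw [List.take_append_of_le_length hle] at heq
      rw [heq]
      exact List.take_prefix _ _
  · intro h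
    exact h.trans (List.prefix_append _ _)

lemma find_eq_of_first {s sub : List Char} {p : Nat} (h1 : sub <+: s.drop p)
    (h2 : ∀ i < p, ¬ sub <+: s.drop i) : PySem.Chars.find s sub = (p : Int) := by
  have hin : PySem.Chars.isIn sub s = true :=
    (PySem.Chars.exists_prefix_drop_iff_isIn sub s).mp ⟨p, h1⟩
  have hnn : 0 ≤ PySem.Chars.find s sub :=
    (PySem.Chars.find_nonneg_iff s sub).mpr ((PySem.Chars.isIn_iff_infix sub s).mp hin)
  obtain ⟨hpre, hmin⟩ := PySem.Chars.find_spec hnn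
  rcases Nat.lt_trichotomy (PySem.Chars.find s sub).toNat p with hlt | heq | hgt
  · exact absurd hpre (h2 _ hlt)
  · rw [← heq, Int.toNat_of_nonneg hnn]
  · exact absurd h1 (hmin p hgt)

lemma drop_block (a : List Char) (c : Char) (b : List Char) (k : Nat) :
    (a ++ c :: b).drop (a.length + (k + 1)) = b.drop k := by
  rw [List.drop_append]
  rw [List.drop_eq_nil_of_le (by omega)]
  simp

lemma take_block (a : List Char) (c : Char) (b : List Char) (k : Nat) :
    (a ++ c :: b).take (a.length + (k + 1)) = a ++ c :: b.take k := by
  rw [List.take_append]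
  rw [List.take_of_length_le (by omega)]
  congr 1
  rw [show a.length + (k + 1) - a.length = k + 1 by omega, List.take_succ_cons]

lemma find_block {c : Char} {first a : List Char} (b : List Char) (hnf : c ∉ first)
    (_hna : c ∉ a) :
    PySem.Chars.find (a ++ c :: b) first =
      if PySem.Chars.isIn first a then PySem.Chars.find a first
      else if PySem.Chars.find b first = -1 then -1
           else (a.length : Int) + 1 + PySem.Chars.find b first := by
  by_cases hin : PySem.Chars.isIn first a = true
  · rw [if_pos hin]
    have hnn : 0 ≤ PySem.Chars.find a first :=
      (PySem.Chars.find_nonneg_iff a first).mpr ((PySem.Chars.isIn_iff_infix first a).mp hin)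
    obtain ⟨hpre, hmin⟩ := PySem.Chars.find_spec hnn
    have hple : (PySem.Chars.find a first).toNat ≤ a.length := by
      have := PySem.Chars.find_le_length a first
      omega
    have hres := find_eq_of_first (s := a ++ c :: b) (sub := first)
      (p := (PySem.Chars.find a first).toNat)
      (by rw [List.drop_append_of_le_length hple]
          exact hpre.trans (List.prefix_append _ _))
      (by intro i hi
          rw [List.drop_append_of_le_length (by omega)]
          rw [prefix_cross _ hnf]
          exact hmin i hi)
    rw [hres, Int.toNat_of_nonneg hnn]
  · rw [if_neg hin]
    have hnia : ¬ first <:+: a := fun h => hin ((PySem.Chars.isIn_iff_infix first a).mpr h)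
    have hno_a : ∀ i ≤ a.length, ¬ first <+: (a ++ c :: b).drop i := by
      intro i hi hpre
      rw [List.drop_append_of_le_length hi, prefix_cross _ hnf] at hpre
      exact hnia (hpre.isInfix.trans (List.drop_suffix i a).isInfix)
    by_cases hb : PySem.Chars.find b first = -1
    · rw [if_pos hb]
      rw [PySem.Chars.find_eq_neg_one_iff] at hb ⊢
      intro hinf
      obtain ⟨j, hj⟩ := (PySem.Chars.exists_prefix_drop_iff_isIn first (a ++ c :: b)).mpr
        ((PySem.Chars.isIn_iff_infix first (a ++ c :: b)).mpr hinf)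
      rcases Nat.lt_or_ge a.length j with hgt | hle
      · rw [show j = a.length + ((j - a.length - 1) + 1) by omega, drop_block] at hj
        exact hb (hj.isInfix.trans (List.drop_suffix _ b).isInfix)
      · exact hno_a j hle hj
    · rw [if_neg hb]
      have hnnb : 0 ≤ PySem.Chars.find b first := by
        have := PySem.Chars.neg_one_le_find b first
        omega
      obtain ⟨hpreb, hminb⟩ := PySem.Chars.find_spec hnnb
      have hres := find_eq_of_first (s := a ++ c :: b) (sub := first)
        (p := a.length + ((PySem.Chars.find b first).toNat + 1))
        (by rw [drop_block]; exact hpreb)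
        (by intro i hi
            rcases Nat.lt_or_ge a.length i with hgt | hle
            · rw [show i = a.length + ((i - a.length - 1) + 1) by omega, drop_block]
              exact hminb _ (by omega)
            · exact hno_a i hle)
      rw [hres]
      push_cast
      rw [Int.toNat_of_nonneg hnnb]
      ring

lemma main_base (first : List Char) (tlen : Int)
    (s : List Char) (hmem : ('\n' : Char) ∉ s) (i : Int) :
    aLoop first tlen (PySem.List.enumerate (pieces '\n' s) i)
    = (if PySem.Chars.find s first = -1 then (1, tlen)
       else (i + ((s.take (PySem.Chars.find s first).toNat).count '\n' : Int) + 1,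
             i + ((s.take (PySem.Chars.find s first).toNat).count '\n' : Int) + tlen)) := by
  rw [pieces_of_not_mem hmem, PySem.List.enumerate_cons, PySem.List.enumerate_nil]
  by_cases h : PySem.Chars.isIn first s = true
  · have hne : PySem.Chars.find s first ≠ -1 :=
      (PySem.Chars.find_ne_neg_one_iff s first).mpr ((PySem.Chars.isIn_iff_infix first s).mp h)
    rw [if_neg hne]
    have hc0 : (s.take (PySem.Chars.find s first).toNat).count '\n' = 0 :=
      List.count_eq_zero.mpr (fun hm => hmem (List.take_subset _ _ hm))
    simp [aLoop, h, hc0]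
  · have heq : PySem.Chars.find s first = -1 :=
      (PySem.Chars.find_eq_neg_one_iff s first).mpr
        (fun hinf => h ((PySem.Chars.isIn_iff_infix first s).mpr hinf))
    rw [if_pos heq]
    simp [aLoop, h]

lemma first_split {c : Char} {s : List Char} (h : c ∈ s) :
    ∃ a b, s = a ++ c :: b ∧ c ∉ a := by
  induction s with
  | nil => cases h
  | cons x t ih =>
    by_cases hx : x = c
    · exact ⟨[], t, by simp [hx], by simp⟩
    · obtain ⟨a, b, h1, h2⟩ := ih (by
        rcases List.mem_cons.mp h with h' | h'
        · exact absurd h'.symm hx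
        · exact h')
      refine ⟨x :: a, b, by rw [h1]; rfl, ?_⟩
      intro hm
      rcases List.mem_cons.mp hm with h' | h'
      · exact hx h'.symm
      · exact h2 h'

lemma main_lemma (first : List Char) (hn : ('\n' : Char) ∉ first) (tlen : Int) :
    ∀ (s : List Char) (i : Int),
    aLoop first tlen (PySem.List.enumerate (pieces '\n' s) i)
    = (if PySem.Chars.find s first = -1 then (1, tlen)
       else (i + ((s.take (PySem.Chars.find s first).toNat).count '\n' : Int) + 1,
             i + ((s.take (PySem.Chars.find s first).toNat).count '\n' : Int) + tlen)) := by
  suffices H : ∀ (n : Nat) (s : List Char), s.length ≤ n → ∀ (i : Int),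
      aLoop first tlen (PySem.List.enumerate (pieces '\n' s) i)
      = (if PySem.Chars.find s first = -1 then (1, tlen)
         else (i + ((s.take (PySem.Chars.find s first).toNat).count '\n' : Int) + 1,
               i + ((s.take (PySem.Chars.find s first).toNat).count '\n' : Int) + tlen)) by
    intro s i; exact H s.length s le_rfl i
  intro n
  induction n with
  | zero =>
    intro s hle i
    have hnil : s = [] := List.eq_nil_of_length_eq_zero (by omega)
    subst hnil
    exact main_base first tlen [] (by simp) i
  | succ n ih =>
    intro s hle i
    by_cases hmem : ('\n' : Char) ∈ s
    case neg => exact main_base first tlen s hmem i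
    case pos =>
      obtain ⟨a, b, hs, hna⟩ := first_split hmem
      subst hs
      have hblen : b.length ≤ n := by
        simp only [List.length_append, List.length_cons] at hle
        omega
      rw [pieces_append b hna, PySem.List.enumerate_cons]
      rw [show aLoop first tlen ((i, a) :: PySem.List.enumerate (pieces '\n' b) (i + 1))
            = if PySem.Chars.isIn first a then (i + 1, i + tlen)
              else aLoop first tlen (PySem.List.enumerate (pieces '\n' b) (i + 1)) from rfl]
      rw [find_block b hn hna]
      by_cases hin : PySem.Chars.isIn first a = true
      · rw [if_pos hin, if_pos hin]
        have hnn : 0 ≤ PySem.Chars.find a first :=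
          (PySem.Chars.find_nonneg_iff a first).mpr ((PySem.Chars.isIn_iff_infix first a).mp hin)
        rw [if_neg (by omega)]
        have hple : (PySem.Chars.find a first).toNat ≤ a.length := by
          have := PySem.Chars.find_le_length a first
          omega
        rw [List.take_append_of_le_length hple]
        have hc0 : (a.take (PySem.Chars.find a first).toNat).count '\n' = 0 :=
          List.count_eq_zero.mpr (fun hm => hna (List.take_subset _ _ hm))
        rw [hc0]
        simp
      · rw [if_neg hin, if_neg hin, ih b hblen (i + 1)]
        by_cases hfb : PySem.Chars.find b first = -1
        · rw [if_pos hfb, if_pos hfb, if_pos rfl]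
        · rw [if_neg hfb, if_neg hfb]
          have hnnb : 0 ≤ PySem.Chars.find b first := by
            have := PySem.Chars.neg_one_le_find b first
            omega
          rw [if_neg (by omega)]
          have htn : ((a.length : Int) + 1 + PySem.Chars.find b first).toNat
              = a.length + ((PySem.Chars.find b first).toNat + 1) := by omega
          rw [htn, take_block, List.count_append, List.count_cons_self]
          have hc0 : a.count '\n' = 0 := List.count_eq_zero.mpr hna
          rw [hc0]
          simp only [Prod.mk.injEq]
          constructor <;> · push_cast; ring

-- ===== VERDICT (by name: the statement is the Claim_ definition above) =====
theorem find_code_location_py_spec : Claim_equal_find_code_location_py := by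
  intro source_code target_code _
  unfold Spec_find_code_location_py find_code_location_py find_code_location_py_alt
  simp only [splitOn_eq_pieces]
  set tl := pieces '\n' target_code.toList with htl
  have htlne : tl ≠ [] := pieces_ne_nil _ _
  rw [if_neg (by simpa [List.isEmpty_iff] using htlne)]
  set first := PySem.Chars.strip (tl.headD []) with hfirst
  have hn : ('\n' : Char) ∉ first := by
    intro hm
    have hmemh : tl.headD [] ∈ tl := by
      cases h : tl with
      | nil => exact absurd h htlne
      | cons x r => simp
    exact pieces_no_sep '\n' target_code.toList _ (htl ▸ hmemh) (strip_subset hm)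
  rw [main_lemma first hn (tl.length : Int) source_code.toList 0]
  by_cases hf : PySem.Chars.find source_code.toList first = -1
  · rw [if_pos hf, if_pos hf]
  · rw [if_neg hf, if_neg hf]
    have hnn : 0 ≤ PySem.Chars.find source_code.toList first := by
      have := PySem.Chars.neg_one_le_find source_code.toList first
      omega
    rw [PySem.List.slice_to _ hnn, count_single]
    simp only [Prod.mk.injEq]
    constructor <;> omega
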